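-- pv_equiv track=rewrite | github.com/Jai-Dhiman/ml-learning | critique-revision-system/src/training/critique_revision.py | _clean_multi_turn_artifacts
-- ===== SOURCE A (Python) =====
-- def _clean_multi_turn_artifacts(text: str) -> str:
--     """
--     Remove hallucinated multi-turn dialogue from model output.
--     Keeps only the first assistant response before any Human/User markers.
--     """
--     # Stop at any indication of a new human turn
--     stop_markers = [
--         "\n\nHuman:", "\nHuman:", "\nH:",
--         "\n\nUser:", "\nUser:", "\nU:",
--         "\n\nAssistant:", "\nAssistant:", "\nA:",
--     ]
--
--     earliest_stop = len(text)
--     for marker in stop_markers: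
--         idx = text.find(marker)
--         if idx != -1 and idx < earliest_stop:
--             earliest_stop = idx
--
--     if earliest_stop < len(text):
--         text = text[:earliest_stop]
--
--     return text.strip()
-- ===== SOURCE B (Python) =====
-- _STOP_MARKERS = (
--     "\n\nHuman:", "\nHuman:", "\nH:",
--     "\n\nUser:", "\nUser:", "\nU:",
--     "\n\nAssistant:", "\nAssistant:", "\nA:",
-- )
--
--
-- def _clean_multi_turn_artifacts(text: str) -> str:
--     # Single left-to-right scan: stop at the first position where any
--     # dialogue-turn marker begins, instead of nine separate find() passes.
--     for i in range(len(text)):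
--         if any(text.startswith(m, i) for m in _STOP_MARKERS):
--             return text[:i].strip()
--     return text.strip()
-- ===== Notes on version B (the rewrite author's own statement) =====
-- stated objective: alternative
-- what changed: Replaces nine separate str.find scans with a running minimum by a single left-to-right scan that stops at the first position where any marker begins (the first such position equals the minimum of the individual find indices).
import Mathlib
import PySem

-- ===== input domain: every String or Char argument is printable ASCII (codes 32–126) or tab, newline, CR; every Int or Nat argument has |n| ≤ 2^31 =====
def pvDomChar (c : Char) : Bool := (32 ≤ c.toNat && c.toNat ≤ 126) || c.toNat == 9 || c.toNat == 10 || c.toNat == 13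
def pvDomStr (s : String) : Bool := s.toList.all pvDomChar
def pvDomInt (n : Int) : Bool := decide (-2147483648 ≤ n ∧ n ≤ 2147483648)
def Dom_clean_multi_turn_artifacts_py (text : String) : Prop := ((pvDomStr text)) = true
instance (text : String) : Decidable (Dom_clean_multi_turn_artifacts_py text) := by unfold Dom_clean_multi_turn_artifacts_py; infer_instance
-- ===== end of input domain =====

-- B replaces A's nine str.find scans with one left-to-right scan that stops at the
-- first position where any marker begins (objective: alternative single-pass algorithm).

-- ===== PORT A =====
def pvStopMarkers : List String :=
  ["\n\nHuman:", "\nHuman:", "\nH:",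
   "\n\nUser:", "\nUser:", "\nU:",
   "\n\nAssistant:", "\nAssistant:", "\nA:"]

-- loop body of A: 'idx = text.find(marker); if idx != -1 and idx < earliest: earliest = idx'
def pvStep (t : String) (e : Int) (m : String) : Int :=
  if PySem.Str.find t m ≠ -1 ∧ PySem.Str.find t m < e then PySem.Str.find t m else e

def clean_multi_turn_artifacts_py (text : String) : String :=
  let earliest := pvStopMarkers.foldl (pvStep text) (PySem.Str.len text)
  let text' := if earliest < PySem.Str.len text then PySem.Str.slice text none (some earliest) else text
  PySem.Str.strip text'

-- ===== PORT B =====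
def pvMarkersB : List (List Char) :=
  ["\n\nHuman:".toList, "\nHuman:".toList, "\nH:".toList,
   "\n\nUser:".toList, "\nUser:".toList, "\nU:".toList,
   "\n\nAssistant:".toList, "\nAssistant:".toList, "\nA:".toList]

-- 'any(text.startswith(m, i) for m in _STOP_MARKERS)' on the suffix starting at i
def pvHasMarkerAt (suf : List Char) : Bool :=
  pvMarkersB.any (fun m => PySem.Chars.startswith suf m)

-- the scan 'for i in range(len(text)): …'; pre holds text[:i] reversed
def pvScanB : List Char → List Char → List Char
  | pre, [] => PySem.Chars.strip pre.reverse
  | pre, c :: rest =>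
      if pvHasMarkerAt (c :: rest) then PySem.Chars.strip pre.reverse
      else pvScanB (c :: pre) rest

def clean_multi_turn_artifacts_py_alt (text : String) : String :=
  String.ofList (pvScanB [] text.toList)

-- ===== PRECONDITION & SPEC =====
def Spec_clean_multi_turn_artifacts_py (text : String) (out : String) : Prop := out = clean_multi_turn_artifacts_py_alt text
instance (text : String) (out : String) : Decidable (Spec_clean_multi_turn_artifacts_py text out) := by unfold Spec_clean_multi_turn_artifacts_py; infer_instance

-- ===== CLAIM (what is proved, stated in full; the proofs are below) =====
def Claim_equal_clean_multi_turn_artifacts_py : Prop := ∀ (text : String), Dom_clean_multi_turn_artifacts_py text → Spec_clean_multi_turn_artifacts_py text (clean_multi_turn_artifacts_py text)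

-- ===== LEMMAS AND PROOFS =====

lemma pvMarkersB_eq : pvMarkersB = pvStopMarkers.map String.toList := by decide

lemma pvMarkersB_ne_nil : ∀ m ∈ pvMarkersB, m ≠ [] := by decide

-- characterisation of A's fold: a running minimum of the find indices
lemma pvFoldMin (t : String) (ms : List String) : ∀ (e : Int),
    ms.foldl (pvStep t) e ≤ e ∧
    (ms.foldl (pvStep t) e = e ∨
      ∃ m ∈ ms, ms.foldl (pvStep t) e = PySem.Str.find t m ∧ PySem.Str.find t m ≠ -1) ∧
    (∀ m ∈ ms, PySem.Str.find t m = -1 ∨ ms.foldl (pvStep t) e ≤ PySem.Str.find t m) := by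
  induction ms with
  | nil => intro e; simp
  | cons m ms ih =>
    intro e
    obtain ⟨h1, h2, h3⟩ := ih (pvStep t e m)
    simp only [List.foldl_cons]
    by_cases hc : PySem.Str.find t m ≠ -1 ∧ PySem.Str.find t m < e
    · have he' : pvStep t e m = PySem.Str.find t m := by unfold pvStep; exact if_pos hc
      rw [he'] at h1 h2 h3 ⊢
      refine ⟨by omega, ?_, ?_⟩
      · rcases h2 with h | ⟨m', hm', h⟩
        · exact Or.inr ⟨m, List.mem_cons_self, h, hc.1⟩
        · exact Or.inr ⟨m', List.mem_cons_of_mem _ hm', h⟩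
      · intro m' hm'
        rcases List.mem_cons.mp hm' with rfl | hm'
        · exact Or.inr h1
        · exact h3 m' hm'
    · have he' : pvStep t e m = e := by unfold pvStep; exact if_neg hc
      rw [he'] at h1 h2 h3 ⊢
      refine ⟨h1, ?_, ?_⟩
      · rcases h2 with h | ⟨m', hm', h⟩
        · exact Or.inl h
        · exact Or.inr ⟨m', List.mem_cons_of_mem _ hm', h⟩
      intro m' hm'
      rcases List.mem_cons.mp hm' with rfl | hm'
      · by_cases hne : PySem.Str.find t m' = -1
        · exact Or.inl hne
        · exact Or.inr (by omega)
      · exact h3 m' hm'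

lemma pvHasMarkerAt_false_iff (suf : List Char) :
    pvHasMarkerAt suf = false ↔ ∀ m ∈ pvMarkersB, ¬ m <+: suf := by
  simp [pvHasMarkerAt, PySem.Chars.startswith_iff]

lemma pvHasMarkerAt_true_iff (suf : List Char) :
    pvHasMarkerAt suf = true ↔ ∃ m ∈ pvMarkersB, m <+: suf := by
  simp [pvHasMarkerAt, PySem.Chars.startswith_iff]

-- B's scan when no marker occurs anywhere: it returns strip of the whole text
lemma pvScanB_none : ∀ (suf pre : List Char),
    (∀ i, ∀ m ∈ pvMarkersB, ¬ m <+: suf.drop i) →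
    pvScanB pre suf = PySem.Chars.strip (pre.reverse ++ suf) := by
  intro suf
  induction suf with
  | nil => intro pre _; simp [pvScanB]
  | cons c rest ih =>
    intro pre h
    have hfalse : pvHasMarkerAt (c :: rest) = false := by
      rw [pvHasMarkerAt_false_iff]
      intro m hm
      simpa using h 0 m hm
    have hstep : pvScanB pre (c :: rest) = pvScanB (c :: pre) rest := by
      rw [pvScanB.eq_def]
      simp [hfalse]
    rw [hstep, ih (c :: pre) (fun i m hm => by simpa using h (i + 1) m hm)]
    simp

-- B's scan when k is the first position where some marker begins
lemma pvScanB_stop : ∀ (k : Nat) (suf pre : List Char),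
    (∀ i < k, ∀ m ∈ pvMarkersB, ¬ m <+: suf.drop i) →
    (∃ m ∈ pvMarkersB, m <+: suf.drop k) →
    pvScanB pre suf = PySem.Chars.strip (pre.reverse ++ suf.take k) := by
  intro k
  induction k with
  | zero =>
    intro suf pre _ hex
    obtain ⟨m, hm, hpre⟩ := hex
    have hm_ne : m ≠ [] := pvMarkersB_ne_nil m hm
    cases suf with
    | nil =>
      exfalso
      exact hm_ne (List.prefix_nil.mp (by simpa using hpre))
    | cons c rest =>
      have htrue : pvHasMarkerAt (c :: rest) = true := by
        rw [pvHasMarkerAt_true_iff]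
        exact ⟨m, hm, by simpa using hpre⟩
      simp [pvScanB, htrue]
  | succ k ih =>
    intro suf pre hlt hex
    cases suf with
    | nil =>
      obtain ⟨m, hm, hpre⟩ := hex
      exact absurd (List.prefix_nil.mp (by simpa using hpre)) (pvMarkersB_ne_nil m hm)
    | cons c rest =>
      have hfalse : pvHasMarkerAt (c :: rest) = false := by
        rw [pvHasMarkerAt_false_iff]
        intro m hm
        simpa using hlt 0 (Nat.succ_pos k) m hm
      have hstep : pvScanB pre (c :: rest) = pvScanB (c :: pre) rest := by
        rw [pvScanB.eq_def]
        simp [hfalse]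
      rw [hstep, ih rest (c :: pre)
        (fun i hi m hm => by simpa using hlt (i + 1) (Nat.succ_lt_succ hi) m hm)
        (by simpa using hex)]
      simp

-- ===== VERDICT (by name: the statement is the Claim_ definition above) =====
theorem clean_multi_turn_artifacts_py_spec : Claim_equal_clean_multi_turn_artifacts_py := by
  intro text _
  simp only [Spec_clean_multi_turn_artifacts_py, clean_multi_turn_artifacts_py, clean_multi_turn_artifacts_py_alt]
  set s := text.toList with hs
  obtain ⟨hle, hor, hmin⟩ := pvFoldMin text pvStopMarkers (PySem.Str.len text)
  set E := pvStopMarkers.foldl (pvStep text) (PySem.Str.len text) with hE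
  by_cases hlt : E < PySem.Str.len text
  · -- a marker occurs; truncation at E
    rcases hor with h | ⟨m, hm, hEf, hne⟩
    · omega
    · have hge0 : 0 ≤ E := by
        have := PySem.Chars.neg_one_le_find s m.toList
        have hfe : PySem.Str.find text m = PySem.Chars.find s m.toList := by
          simp [hs]
        omega
      have hfind0 : 0 ≤ PySem.Chars.find s m.toList := by
        have hfe : PySem.Str.find text m = PySem.Chars.find s m.toList := by simp [hs]
        omega
      obtain ⟨hpref, _⟩ := PySem.Chars.find_spec (s := s) (sub := m.toList) hfind0
      have hEfind : E = PySem.Chars.find s m.toList := by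
        have hfe : PySem.Str.find text m = PySem.Chars.find s m.toList := by simp [hs]
        omega
      -- B stops exactly at E.toNat
      have hstop : pvScanB [] s = PySem.Chars.strip (s.take E.toNat) := by
        rw [pvScanB_stop E.toNat s []
          (by
            intro i hi m' hm' hpre
            -- marker m' occurs at i < E.toNat: contradicts minimality
            have hmem : m' ∈ pvMarkersB := hm'
            rw [pvMarkersB_eq] at hmem
            obtain ⟨m0, hm0, rfl⟩ := List.mem_map.mp hmem
            have hinfix : m0.toList <:+: s :=
              hpre.isInfix.trans (List.drop_suffix i s).isInfix
            have hne0 : PySem.Chars.find s m0.toList ≠ -1 :=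
              (PySem.Chars.find_ne_neg_one_iff s m0.toList).mpr hinfix
            have hfe : PySem.Str.find text m0 = PySem.Chars.find s m0.toList := by simp [hs]
            rcases hmin m0 hm0 with hcontra | hEle
            · exact hne0 (by omega)
            · have h0f : 0 ≤ PySem.Chars.find s m0.toList := by
                have := PySem.Chars.neg_one_le_find s m0.toList
                omega
              obtain ⟨_, hmin0⟩ := PySem.Chars.find_spec (s := s) (sub := m0.toList) h0f
              exact hmin0 i (by omega) hpre)
          ⟨m.toList, by rw [pvMarkersB_eq]; exact List.mem_map_of_mem hm, by rw [hEfind]; exact hpref⟩]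
        simp
      rw [if_pos hlt, hstop]
      have hslice : PySem.List.slice s none (some E) = List.take E.toNat s := by
        obtain ⟨k, hk⟩ : ∃ k : Nat, E = (k : Int) := ⟨E.toNat, (Int.toNat_of_nonneg hge0).symm⟩
        rw [hk]
        simp [PySem.List.slice]
      simp [PySem.Str.strip, PySem.Str.slice, PySem.Chars.slice, hslice, ← hs]
  · -- no marker occurs before the end: both return strip(text)
    have hnone : ∀ i, ∀ m ∈ pvMarkersB, ¬ m <+: s.drop i := by
      intro i m' hm' hpre
      have hmem : m' ∈ pvMarkersB := hm'
      rw [pvMarkersB_eq] at hmem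
      obtain ⟨m0, hm0, rfl⟩ := List.mem_map.mp hmem
      have hinfix : m0.toList <:+: s :=
        hpre.isInfix.trans (List.drop_suffix i s).isInfix
      have hne0 : PySem.Chars.find s m0.toList ≠ -1 :=
        (PySem.Chars.find_ne_neg_one_iff s m0.toList).mpr hinfix
      have hfe : PySem.Str.find text m0 = PySem.Chars.find s m0.toList := by simp [hs]
      have h0f : 0 ≤ PySem.Chars.find s m0.toList := by
        have := PySem.Chars.neg_one_le_find s m0.toList
        omega
      obtain ⟨hpref0, _⟩ := PySem.Chars.find_spec (s := s) (sub := m0.toList) h0f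
      -- the occurrence forces find < len s
      have hmne : m0.toList ≠ [] := pvMarkersB_ne_nil _ (by rw [pvMarkersB_eq]; exact List.mem_map_of_mem hm0)
      have hlen1 : 1 ≤ m0.toList.length := by
        cases h : m0.toList with
        | nil => exact absurd h hmne
        | cons a l => simp
      have hlelen := hpref0.length_le
      rw [List.length_drop] at hlelen
      have hfl := PySem.Chars.find_le_length s m0.toList
      have hlen_eq : PySem.Str.len text = (s.length : Int) := by simp [hs]
      rcases hmin m0 hm0 with hcontra | hEle
      · exact hne0 (by omega)
      · -- E ≤ find < len s contradicts ¬ E < len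
        have : (PySem.Chars.find s m0.toList).toNat + m0.toList.length ≤ s.length := by omega
        omega
    rw [if_neg hlt, pvScanB_none s [] hnone]
    simp [PySem.Str.strip, ← hs]
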